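-- pv_equiv track=rewrite | github.com/Anastasiia-Ni/computor_v1 | equation_parser.py | split_equation
-- ===== SOURCE A (Python) =====
-- def split_equation(part_str):
--     equation_parts = part_str.split('+')
--     split_parts = []
--
--     for part in equation_parts:
--         parts_with_minus = part.split('-')
--         for i, sub_part in enumerate(parts_with_minus):
--             if i == 0:
--                 split_parts.append(sub_part)
--             else:
--                 split_parts.append('-' + sub_part)
--
--     return split_parts
-- ===== SOURCE B (Python) =====
-- def split_equation(part_str):
--     result = []
--     current = []
--     for ch in part_str:
--         if ch == '+':
--             result.append(''.join(current))
--             current = []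
--         elif ch == '-':
--             result.append(''.join(current))
--             current = ['-']
--         else:
--             current.append(ch)
--     result.append(''.join(current))
--     return result
-- ===== Notes on version B (the rewrite author's own statement) =====
-- stated objective: simpler
-- what changed: Replaced the nested plus-split/minus-split passes with a single left-to-right character scan that cuts the string at each sign, dropping a plus and keeping a minus on the term it starts.
import Mathlib
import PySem

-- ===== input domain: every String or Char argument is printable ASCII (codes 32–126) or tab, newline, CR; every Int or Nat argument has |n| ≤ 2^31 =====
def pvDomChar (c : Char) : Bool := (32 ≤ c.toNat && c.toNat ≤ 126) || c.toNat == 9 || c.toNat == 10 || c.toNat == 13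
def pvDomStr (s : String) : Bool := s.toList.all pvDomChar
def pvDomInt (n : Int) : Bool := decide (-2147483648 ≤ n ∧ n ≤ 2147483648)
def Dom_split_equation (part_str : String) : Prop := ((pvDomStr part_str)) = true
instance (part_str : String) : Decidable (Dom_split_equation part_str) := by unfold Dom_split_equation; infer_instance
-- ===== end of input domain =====

-- B replaces A's nested split('+')/split('-') passes with a single character scan (simpler, same result).

-- ===== PORT A =====
def split_equation (part_str : String) : List String :=
  let equation_parts := PySem.Chars.splitOn part_str.toList ['+']
  let split_parts : List String :=
    equation_parts.foldl (fun split_parts part =>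
      let parts_with_minus := PySem.Chars.splitOn part ['-']
      (PySem.List.enumerate parts_with_minus 0).foldl (fun sp p =>
        if p.1 = 0 then sp ++ [String.ofList p.2]
        else sp ++ [String.ofList ('-' :: p.2)]) split_parts) []
  split_parts

-- ===== PORT B =====
def split_equation_alt (part_str : String) : List String :=
  let st := part_str.toList.foldl (fun (st : List String × List Char) ch =>
    if ch = '+' then (st.1 ++ [String.ofList st.2], [])
    else if ch = '-' then (st.1 ++ [String.ofList st.2], ['-'])
    else (st.1, st.2 ++ [ch])) ([], [])
  st.1 ++ [String.ofList st.2]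

-- ===== PRECONDITION & SPEC =====
def Spec_split_equation (part_str : String) (out : List String) : Prop := out = split_equation_alt part_str
instance (part_str : String) (out : List String) : Decidable (Spec_split_equation part_str out) := by unfold Spec_split_equation; infer_instance

-- ===== CLAIM (what is proved, stated in full; the proofs are below) =====
def Claim_equal_split_equation : Prop := ∀ (part_str : String), Dom_split_equation part_str → Spec_split_equation part_str (split_equation part_str)

-- ===== LEMMAS AND PROOFS =====

-- prepend c to the first piece (Python's '-' + sub on the head of a later split)
def pvConsHead (c : Char) : List (List Char) → List (List Char)
  | [] => [[c]]
  | h :: r => (c :: h) :: r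

-- prepend a whole prefix to the first piece
def pvConsPre (pre : List Char) : List (List Char) → List (List Char)
  | [] => [pre]
  | h :: r => (pre ++ h) :: r

-- clean structural recursion for Python's s.split(sep) with a one-char separator
def pvSplits (sep : Char) : List Char → List (List Char)
  | [] => [[]]
  | c :: t => if c = sep then [] :: pvSplits sep t else pvConsHead c (pvSplits sep t)

-- A's inner loop: head unchanged, later pieces get a '-' prefix
def pvMapMinus : List (List Char) → List (List Char)
  | [] => []
  | h :: r => h :: r.map (fun x => '-' :: x)

-- B's scan as a structural recursion (terms still to be emitted, first one prefixed by cur)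
def pvBScan (cur : List Char) : List Char → List String
  | [] => [String.ofList cur]
  | c :: t =>
      if c = '+' then String.ofList cur :: pvBScan [] t
      else if c = '-' then String.ofList cur :: pvBScan ['-'] t
      else pvBScan (cur ++ [c]) t

-- the combined term list both programs produce
def pvComb : List Char → List (List Char)
  | [] => [[]]
  | c :: t =>
      if c = '+' then [] :: pvComb t
      else if c = '-' then [] :: pvConsHead '-' (pvComb t)
      else pvConsHead c (pvComb t)

theorem pvSplits_ne_nil (sep : Char) (l : List Char) : pvSplits sep l ≠ [] := by
  cases l with
  | nil => simp [pvSplits]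
  | cons c t =>
    simp only [pvSplits]
    split
    · simp
    · cases h : pvSplits sep t <;> simp [pvConsHead]

theorem pvComb_ne_nil (l : List Char) : pvComb l ≠ [] := by
  cases l with
  | nil => simp [pvComb]
  | cons c t =>
    simp only [pvComb]
    split
    · simp
    · split <;> [skip; skip] <;> cases h : pvComb t <;> simp [pvConsHead]

theorem pvConsPre_nil_of_ne (xs : List (List Char)) (h : xs ≠ []) : pvConsPre [] xs = xs := by
  cases xs with
  | nil => exact absurd rfl h
  | cons a r => simp [pvConsPre]

theorem pvConsPre_single (c : Char) (xs : List (List Char)) : pvConsPre [c] xs = pvConsHead c xs := by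
  cases xs <;> simp [pvConsPre, pvConsHead]

-- A's splitOn.go equals acc.reverse ++ an accumulator-free scan (single-char separator)
def pvScanA (sep : Char) (cur : List Char) : List Char → List (List Char)
  | [] => [cur.reverse]
  | c :: t => if c = sep then cur.reverse :: pvScanA sep [] t else pvScanA sep (c :: cur) t

theorem pvSplitOn_go_eq (sep : Char) (l : List Char) :
    ∀ (fuel : Nat) (cur : List Char) (acc : List (List Char)), l.length < fuel →
      PySem.Chars.splitOn.go [sep] fuel l cur acc = acc.reverse ++ pvScanA sep cur l := by
  induction l with
  | nil =>
    intro fuel cur acc h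
    cases fuel with
    | zero => omega
    | succ f => simp [PySem.Chars.splitOn.go, pvScanA]
  | cons c t ih =>
    intro fuel cur acc h
    cases fuel with
    | zero => omega
    | succ f =>
      simp only [PySem.Chars.splitOn.go]
      by_cases hc : c = sep
      · have hp : List.isPrefixOf [sep] (c :: t) = true := by
          simp [List.isPrefixOf, hc]
        simp only [hp, if_pos]
        rw [show List.drop (List.length [sep]) (c :: t) = t by simp]
        rw [ih f [] (cur.reverse :: acc) (by simpa using Nat.lt_of_succ_lt_succ h)]
        simp [pvScanA, hc]
      · have hp : List.isPrefixOf [sep] (c :: t) = false := by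
          simp [List.isPrefixOf]
          exact fun hq => absurd hq.symm hc
        simp only [hp]
        rw [if_neg (by simp)]
        rw [ih f (c :: cur) acc (by simpa using Nat.lt_of_succ_lt_succ h)]
        simp [pvScanA, hc]

theorem pvScanA_eq (sep : Char) (l : List Char) :
    ∀ cur, pvScanA sep cur l = pvConsPre cur.reverse (pvSplits sep l) := by
  induction l with
  | nil => intro cur; simp [pvScanA, pvSplits, pvConsPre]
  | cons c t ih =>
    intro cur
    simp only [pvScanA, pvSplits]
    by_cases hc : c = sep
    · rw [if_pos hc, if_pos hc, ih []]
      simp only [List.reverse_nil]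
      rw [pvConsPre_nil_of_ne _ (pvSplits_ne_nil sep t)]
      cases h : pvSplits sep t with
      | nil => exact absurd h (pvSplits_ne_nil sep t)
      | cons a r => simp [pvConsPre]
    · rw [if_neg hc, if_neg hc, ih (c :: cur)]
      cases h : pvSplits sep t with
      | nil => exact absurd h (pvSplits_ne_nil sep t)
      | cons a r => simp [pvConsPre, pvConsHead]

theorem pvSplitOn_eq (sep : Char) (l : List Char) :
    PySem.Chars.splitOn l [sep] = pvSplits sep l := by
  unfold PySem.Chars.splitOn
  rw [pvSplitOn_go_eq sep l (l.length + 1) [] [] (by omega), pvScanA_eq]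
  simpa using pvConsPre_nil_of_ne _ (pvSplits_ne_nil sep l)

-- A's inner loop over enumerate, indices ≥ 1: every piece gets the '-' prefix
theorem pvInner_pos (ps : List (List Char)) :
    ∀ (n : Nat) (sp : List String), 1 ≤ n →
      (PySem.List.enumerate ps (n : Int)).foldl (fun sp p =>
        if p.1 = 0 then sp ++ [String.ofList p.2] else sp ++ [String.ofList ('-' :: p.2)]) sp
      = sp ++ ps.map (fun x => String.ofList ('-' :: x)) := by
  induction ps with
  | nil => intro n sp _; simp [PySem.List.enumerate_nil]
  | cons a r ih =>
    intro n sp hn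
    rw [PySem.List.enumerate_cons]
    simp only [List.foldl_cons]
    rw [if_neg (by omega)]
    rw [show (n : Int) + 1 = ((n + 1 : Nat) : Int) by push_cast; ring]
    rw [ih (n + 1) _ (by omega)]
    simp

theorem pvInner_eq (ps : List (List Char)) (sp : List String) (h : ps ≠ []) :
    (PySem.List.enumerate ps (0 : Int)).foldl (fun sp p =>
        if p.1 = 0 then sp ++ [String.ofList p.2] else sp ++ [String.ofList ('-' :: p.2)]) sp
      = sp ++ (pvMapMinus ps).map String.ofList := by
  cases ps with
  | nil => exact absurd rfl h
  | cons a r =>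
    rw [PySem.List.enumerate_cons]
    simp only [List.foldl_cons]
    rw [show (0 : Int) + 1 = ((1 : Nat) : Int) by norm_num]
    rw [pvInner_pos r 1 _ (le_refl 1)]
    simp [pvMapMinus]

-- A's outer loop as a flatMap over the pure splits
theorem pvOuter (parts : List (List Char)) :
    ∀ sp : List String,
      parts.foldl (fun split_parts part =>
        (PySem.List.enumerate (PySem.Chars.splitOn part ['-']) 0).foldl (fun sp p =>
          if p.1 = 0 then sp ++ [String.ofList p.2] else sp ++ [String.ofList ('-' :: p.2)]) split_parts) sp
      = sp ++ (parts.flatMap (fun p => pvMapMinus (pvSplits '-' p))).map String.ofList := by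
  induction parts with
  | nil => intro sp; simp
  | cons a r ih =>
    intro sp
    simp only [List.foldl_cons]
    rw [pvSplitOn_eq, pvInner_eq _ _ (pvSplits_ne_nil '-' a), ih]
    simp

theorem pvA_eq (s : String) :
    split_equation s
      = ((pvSplits '+' s.toList).flatMap (fun p => pvMapMinus (pvSplits '-' p))).map String.ofList := by
  unfold split_equation
  dsimp only
  rw [pvSplitOn_eq, pvOuter]
  simp

theorem pvCore (s : List Char) :
    (pvSplits '+' s).flatMap (fun p => pvMapMinus (pvSplits '-' p)) = pvComb s := by
  induction s with
  | nil => simp [pvSplits, pvComb, pvMapMinus]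
  | cons c t ih =>
    by_cases hp : c = '+'
    · simp only [pvSplits, pvComb, if_pos hp, List.flatMap_cons]
      rw [ih]
      simp [pvMapMinus]
    · by_cases hm : c = '-'
      · simp only [pvSplits, pvComb, if_neg hp, if_pos hm]
        subst hm
        cases h : pvSplits '+' t with
        | nil => exact absurd h (pvSplits_ne_nil '+' t)
        | cons a r =>
          rw [h] at ih
          simp only [pvConsHead, List.flatMap_cons]
          simp only [pvSplits]
          cases h2 : pvSplits '-' a with
          | nil => exact absurd h2 (pvSplits_ne_nil '-' a)
          | cons a2 r2 =>
            rw [← ih]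
            simp [List.flatMap_cons, h2, pvMapMinus]
      · simp only [pvSplits, pvComb, if_neg hp, if_neg hm]
        cases h : pvSplits '+' t with
        | nil => exact absurd h (pvSplits_ne_nil '+' t)
        | cons a r =>
          rw [h] at ih
          simp only [pvConsHead, List.flatMap_cons]
          simp only [pvSplits, if_neg hm]
          cases h2 : pvSplits '-' a with
          | nil => exact absurd h2 (pvSplits_ne_nil '-' a)
          | cons a2 r2 =>
            rw [← ih]
            simp [List.flatMap_cons, h2, pvMapMinus, pvConsHead]

-- B's foldl equals the structural scan
theorem pvB_foldl (l : List Char) :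
    ∀ (res : List String) (cur : List Char),
      (let st := l.foldl (fun (st : List String × List Char) ch =>
        if ch = '+' then (st.1 ++ [String.ofList st.2], [])
        else if ch = '-' then (st.1 ++ [String.ofList st.2], ['-'])
        else (st.1, st.2 ++ [ch])) (res, cur)
       st.1 ++ [String.ofList st.2]) = res ++ pvBScan cur l := by
  induction l with
  | nil => intro res cur; simp [pvBScan]
  | cons c t ih =>
    intro res cur
    simp only [List.foldl_cons]
    by_cases hp : c = '+'
    · simp only [if_pos hp]
      rw [ih (res ++ [String.ofList cur]) []]
      simp [pvBScan, hp]
    · by_cases hm : c = '-'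
      · simp only [if_neg hp, if_pos hm]
        rw [ih (res ++ [String.ofList cur]) ['-']]
        simp [pvBScan, hm]
      · simp only [if_neg hp, if_neg hm]
        rw [ih res (cur ++ [c])]
        simp [pvBScan, hp, hm]

theorem pvBScan_eq (l : List Char) :
    ∀ cur, pvBScan cur l = (pvConsPre cur (pvComb l)).map String.ofList := by
  induction l with
  | nil => intro cur; simp [pvBScan, pvComb, pvConsPre]
  | cons c t ih =>
    intro cur
    by_cases hp : c = '+'
    · simp only [pvBScan, pvComb, if_pos hp, ih []]
      rw [pvConsPre_nil_of_ne _ (pvComb_ne_nil t)]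
      cases h : pvComb t with
      | nil => exact absurd h (pvComb_ne_nil t)
      | cons a r => simp [pvConsPre]
    · by_cases hm : c = '-'
      · simp only [pvBScan, pvComb, if_neg hp, if_pos hm, ih ['-']]
        rw [pvConsPre_single]
        cases h : pvConsHead '-' (pvComb t) with
        | nil => cases h2 : pvComb t <;> simp [pvConsHead, h2] at h
        | cons a r => simp [pvConsPre]
      · simp only [pvBScan, pvComb, if_neg hp, if_neg hm, ih (cur ++ [c])]
        cases h : pvComb t with
        | nil => simp [pvConsPre, pvConsHead]
        | cons a r => simp [pvConsPre, pvConsHead]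

theorem pvB_eq (s : String) :
    split_equation_alt s = (pvComb s.toList).map String.ofList := by
  unfold split_equation_alt
  rw [pvB_foldl s.toList [] []]
  rw [pvBScan_eq]
  rw [pvConsPre_nil_of_ne _ (pvComb_ne_nil s.toList)]
  simp

-- ===== VERDICT (by name: the statement is the Claim_ definition above) =====
theorem split_equation_spec : Claim_equal_split_equation := by
  intro s _
  unfold Spec_split_equation
  rw [pvA_eq, pvB_eq, pvCore]
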